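-- pv_equiv track=rewrite | github.com/gabriel-legros/Terraforming_Titans | tools/sector_resource_populator.py | compute_ring_index
-- ===== SOURCE A (Python) =====
-- def compute_ring_index(q: int, r: int, ring: int) -> int:
--     if ring == 0:
--         return 0
--     current_q = ring
--     current_r = 0
--     index = 0
--     if current_q == q and current_r == r:
--         return index
--     directions = [(0, -1), (-1, 0), (-1, 1), (0, 1), (1, 0), (1, -1)]
--     for dq, dr in directions:
--         for _ in range(ring):
--             current_q += dq
--             current_r += dr
--             index += 1
--             if current_q == q and current_r == r:
--                 return index
--     return index % (ring * 6)
-- ===== SOURCE B (Python) =====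
-- def compute_ring_index(q: int, r: int, ring: int) -> int:
--     if ring <= 0:
--         return 0
--     if max(abs(q), abs(r), abs(q + r)) != ring:
--         return 0
--     if q == ring:
--         return -r
--     if r == -ring or q + r == -ring:
--         return 2 * ring - q
--     if q == -ring:
--         return 3 * ring + r
--     return 5 * ring + q
-- ===== Notes on version B (the rewrite author's own statement) =====
-- stated objective: faster
-- what changed: Replaced the O(ring) walk around all six sides of the hex ring with an O(1) closed form: a hex-distance membership test followed by a per-side arithmetic formula for the index.
import Mathlib
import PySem

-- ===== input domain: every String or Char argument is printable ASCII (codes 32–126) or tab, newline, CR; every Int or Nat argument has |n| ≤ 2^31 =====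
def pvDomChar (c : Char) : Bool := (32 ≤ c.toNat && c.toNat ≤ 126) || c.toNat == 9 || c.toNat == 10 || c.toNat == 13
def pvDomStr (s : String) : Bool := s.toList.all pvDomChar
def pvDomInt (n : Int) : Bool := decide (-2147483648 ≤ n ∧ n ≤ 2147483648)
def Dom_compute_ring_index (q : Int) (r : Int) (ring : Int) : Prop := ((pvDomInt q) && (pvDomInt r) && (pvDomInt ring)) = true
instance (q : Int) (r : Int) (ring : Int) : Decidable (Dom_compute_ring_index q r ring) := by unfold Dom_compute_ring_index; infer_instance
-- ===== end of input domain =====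

-- B replaces A's O(ring) walk around the hex ring by an O(1) closed form (membership test + per-side index formula); objective: faster (asymptotic).


-- ===== PORT A =====
-- inner 'for _ in range(ring)' loop of A with early return (Sum.inr = returned index)
def pvSide (q r dq dr cq cr idx : Int) : Nat → (Int × Int × Int) ⊕ Int
  | 0 => Sum.inl (cq, cr, idx)
  | Nat.succ n =>
      if cq + dq = q ∧ cr + dr = r then Sum.inr (idx + 1)
      else pvSide q r dq dr (cq + dq) (cr + dr) (idx + 1) n

def compute_ring_index (q : Int) (r : Int) (ring : Int) : Int :=
  if ring = 0 then 0
  else if ring = q ∧ (0 : Int) = r then 0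
  else
    match ([((0:Int), (-1:Int)), (-1, 0), (-1, 1), (0, 1), (1, 0), (1, -1)]).foldl
        (fun (s : (Int × Int × Int) ⊕ Int) (d : Int × Int) =>
          match s with
          | Sum.inr i => Sum.inr i
          | Sum.inl (cq, cr, idx) => pvSide q r d.1 d.2 cq cr idx ring.toNat)
        (Sum.inl (ring, 0, 0)) with
    | Sum.inr i => i
    | Sum.inl (_, _, idx) => PySem.Int.mod idx (ring * 6)

-- ===== PORT B =====
def compute_ring_index_alt (q : Int) (r : Int) (ring : Int) : Int :=
  if ring ≤ 0 then 0
  else if max (max |q| |r|) |q + r| ≠ ring then 0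
  else if q = ring then -r
  else if r = -ring ∨ q + r = -ring then 2 * ring - q
  else if q = -ring then 3 * ring + r
  else 5 * ring + q

-- ===== PRECONDITION & SPEC =====
def Spec_compute_ring_index (q : Int) (r : Int) (ring : Int) (out : Int) : Prop := out = compute_ring_index_alt q r ring
instance (q : Int) (r : Int) (ring : Int) (out : Int) : Decidable (Spec_compute_ring_index q r ring out) := by unfold Spec_compute_ring_index; infer_instance

-- ===== CLAIM (what is proved, stated in full; the proofs are below) =====
def Claim_equal_compute_ring_index : Prop := ∀ (q : Int) (r : Int) (ring : Int), Dom_compute_ring_index q r ring → Spec_compute_ring_index q r ring (compute_ring_index q r ring)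

-- ===== LEMMAS AND PROOFS =====

-- if the side's walk passes through (q, r) at step t, the loop returns idx + t
lemma pvSide_hit (q r dq dr cq cr idx : Int) (n : Nat) (t : Int)
    (hd : dq ≠ 0 ∨ dr ≠ 0) (h1 : 1 ≤ t) (h2 : t ≤ (n : Int))
    (hq : q = cq + t * dq) (hr : r = cr + t * dr) :
    pvSide q r dq dr cq cr idx n = Sum.inr (idx + t) := by
  induction n generalizing cq cr idx t with
  | zero => exfalso; simp at h2; omega
  | succ m ih =>
    simp only [pvSide]
    by_cases hm : cq + dq = q ∧ cr + dr = r
    · have ht : t = 1 := by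
        rcases hd with h | h
        · have h0 : (t - 1) * dq = 0 := by linear_combination -hq - hm.1
          rcases mul_eq_zero.mp h0 with h' | h'
          · omega
          · exact absurd h' h
        · have h0 : (t - 1) * dr = 0 := by linear_combination -hr - hm.2
          rcases mul_eq_zero.mp h0 with h' | h'
          · omega
          · exact absurd h' h
      rw [if_pos hm, ht]
    · have ht : t ≠ 1 := by
        intro h; subst h
        exact hm ⟨by linear_combination -hq, by linear_combination -hr⟩
      have := ih (cq + dq) (cr + dr) (idx + 1) (t - 1)
        (by omega) (by push_cast at h2 ⊢; omega)
        (by linear_combination hq) (by linear_combination hr)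
      rw [if_neg hm, this]
      congr 1; ring

-- if the side's walk never passes through (q, r), the loop falls through
lemma pvSide_miss (q r dq dr cq cr idx : Int) (n : Nat)
    (h : ∀ t : Int, 1 ≤ t → t ≤ (n : Int) → ¬(q = cq + t * dq ∧ r = cr + t * dr)) :
    pvSide q r dq dr cq cr idx n = Sum.inl (cq + n * dq, cr + n * dr, idx + n) := by
  induction n generalizing cq cr idx with
  | zero => simp [pvSide]
  | succ m ih =>
    simp only [pvSide]
    have hm : ¬(cq + dq = q ∧ cr + dr = r) := by
      intro ⟨ha, hb⟩
      exact h 1 le_rfl (by push_cast; omega) ⟨by linear_combination -ha, by linear_combination -hb⟩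
    rw [if_neg hm, ih (cq + dq) (cr + dr) (idx + 1)
      (fun t ht1 ht2 => by
        have := h (t + 1) (by omega) (by push_cast at ht2 ⊢; omega)
        intro ⟨ha, hb⟩
        exact this ⟨by linear_combination ha, by linear_combination hb⟩)]
    simp only [Sum.inl.injEq, Prod.mk.injEq]
    push_cast
    exact ⟨by ring, by ring, by ring⟩

-- closed-form descriptions of each of the six side scans of A's walk (hit = first match, miss = fall-through)
lemma side1_hit (q r ring : Int) (hpos : 0 < ring) (hq : q = ring) (h1 : -ring ≤ r) (h2 : r ≤ -1) :
    pvSide q r 0 (-1) ring 0 0 ring.toNat = Sum.inr (-r) := by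
  have hc : (ring.toNat : Int) = ring := Int.toNat_of_nonneg (by omega)
  rw [pvSide_hit q r 0 (-1) ring 0 0 ring.toNat (-r) (Or.inr (by norm_num)) (by omega)
    (by rw [hc]; omega) (by omega) (by omega)]
  norm_num

lemma side1_miss (q r ring : Int) (hpos : 0 < ring)
    (hx : ¬(q = ring ∧ -ring ≤ r ∧ r ≤ -1)) :
    pvSide q r 0 (-1) ring 0 0 ring.toNat = Sum.inl (ring, -ring, ring) := by
  have hc : (ring.toNat : Int) = ring := Int.toNat_of_nonneg (by omega)
  rw [pvSide_miss q r 0 (-1) ring 0 0 ring.toNat (by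
    intro t ht1 ht2 he
    rw [hc] at ht2
    exact hx ⟨by omega, by omega, by omega⟩), hc]
  simp only [Sum.inl.injEq, Prod.mk.injEq]
  exact ⟨by ring, by ring, by ring⟩

lemma side2_hit (q r ring : Int) (hpos : 0 < ring) (hr : r = -ring) (h1 : 0 ≤ q) (h2 : q ≤ ring - 1) :
    pvSide q r (-1) 0 ring (-ring) ring ring.toNat = Sum.inr (2 * ring - q) := by
  have hc : (ring.toNat : Int) = ring := Int.toNat_of_nonneg (by omega)
  rw [pvSide_hit q r (-1) 0 ring (-ring) ring ring.toNat (ring - q) (Or.inl (by norm_num)) (by omega)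
    (by rw [hc]; omega) (by omega) (by omega)]
  congr 1; ring

lemma side2_miss (q r ring : Int) (hpos : 0 < ring)
    (hx : ¬(r = -ring ∧ 0 ≤ q ∧ q ≤ ring - 1)) :
    pvSide q r (-1) 0 ring (-ring) ring ring.toNat = Sum.inl (0, -ring, 2 * ring) := by
  have hc : (ring.toNat : Int) = ring := Int.toNat_of_nonneg (by omega)
  rw [pvSide_miss q r (-1) 0 ring (-ring) ring ring.toNat (by
    intro t ht1 ht2 he
    rw [hc] at ht2
    exact hx ⟨by omega, by omega, by omega⟩), hc]
  simp only [Sum.inl.injEq, Prod.mk.injEq]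
  exact ⟨by ring, by ring, by ring⟩

lemma side3_hit (q r ring : Int) (hpos : 0 < ring) (hqr : q + r = -ring) (h1 : -ring ≤ q) (h2 : q ≤ -1) :
    pvSide q r (-1) 1 0 (-ring) (2 * ring) ring.toNat = Sum.inr (2 * ring - q) := by
  have hc : (ring.toNat : Int) = ring := Int.toNat_of_nonneg (by omega)
  rw [pvSide_hit q r (-1) 1 0 (-ring) (2 * ring) ring.toNat (-q) (Or.inl (by norm_num)) (by omega)
    (by rw [hc]; omega) (by omega) (by omega)]
  congr 1

lemma side3_miss (q r ring : Int) (hpos : 0 < ring)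
    (hx : ¬(q + r = -ring ∧ -ring ≤ q ∧ q ≤ -1)) :
    pvSide q r (-1) 1 0 (-ring) (2 * ring) ring.toNat = Sum.inl (-ring, 0, 3 * ring) := by
  have hc : (ring.toNat : Int) = ring := Int.toNat_of_nonneg (by omega)
  rw [pvSide_miss q r (-1) 1 0 (-ring) (2 * ring) ring.toNat (by
    intro t ht1 ht2 he
    rw [hc] at ht2
    exact hx ⟨by omega, by omega, by omega⟩), hc]
  simp only [Sum.inl.injEq, Prod.mk.injEq]
  exact ⟨by ring, by ring, by ring⟩

lemma side4_hit (q r ring : Int) (hpos : 0 < ring) (hq : q = -ring) (h1 : 1 ≤ r) (h2 : r ≤ ring) :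
    pvSide q r 0 1 (-ring) 0 (3 * ring) ring.toNat = Sum.inr (3 * ring + r) := by
  have hc : (ring.toNat : Int) = ring := Int.toNat_of_nonneg (by omega)
  rw [pvSide_hit q r 0 1 (-ring) 0 (3 * ring) ring.toNat r (Or.inr (by norm_num)) (by omega)
    (by rw [hc]; omega) (by omega) (by omega)]

lemma side4_miss (q r ring : Int) (hpos : 0 < ring)
    (hx : ¬(q = -ring ∧ 1 ≤ r ∧ r ≤ ring)) :
    pvSide q r 0 1 (-ring) 0 (3 * ring) ring.toNat = Sum.inl (-ring, ring, 4 * ring) := by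
  have hc : (ring.toNat : Int) = ring := Int.toNat_of_nonneg (by omega)
  rw [pvSide_miss q r 0 1 (-ring) 0 (3 * ring) ring.toNat (by
    intro t ht1 ht2 he
    rw [hc] at ht2
    exact hx ⟨by omega, by omega, by omega⟩), hc]
  simp only [Sum.inl.injEq, Prod.mk.injEq]
  exact ⟨by ring, by ring, by ring⟩

lemma side5_hit (q r ring : Int) (hpos : 0 < ring) (hr : r = ring) (h1 : -ring + 1 ≤ q) (h2 : q ≤ 0) :
    pvSide q r 1 0 (-ring) ring (4 * ring) ring.toNat = Sum.inr (5 * ring + q) := by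
  have hc : (ring.toNat : Int) = ring := Int.toNat_of_nonneg (by omega)
  rw [pvSide_hit q r 1 0 (-ring) ring (4 * ring) ring.toNat (q + ring) (Or.inl (by norm_num)) (by omega)
    (by rw [hc]; omega) (by omega) (by omega)]
  congr 1; ring

lemma side5_miss (q r ring : Int) (hpos : 0 < ring)
    (hx : ¬(r = ring ∧ -ring + 1 ≤ q ∧ q ≤ 0)) :
    pvSide q r 1 0 (-ring) ring (4 * ring) ring.toNat = Sum.inl (0, ring, 5 * ring) := by
  have hc : (ring.toNat : Int) = ring := Int.toNat_of_nonneg (by omega)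
  rw [pvSide_miss q r 1 0 (-ring) ring (4 * ring) ring.toNat (by
    intro t ht1 ht2 he
    rw [hc] at ht2
    exact hx ⟨by omega, by omega, by omega⟩), hc]
  simp only [Sum.inl.injEq, Prod.mk.injEq]
  exact ⟨by ring, by ring, by ring⟩

lemma side6_hit (q r ring : Int) (hpos : 0 < ring) (hqr : q + r = ring) (h1 : 1 ≤ q) (h2 : q ≤ ring - 1) :
    pvSide q r 1 (-1) 0 ring (5 * ring) ring.toNat = Sum.inr (5 * ring + q) := by
  have hc : (ring.toNat : Int) = ring := Int.toNat_of_nonneg (by omega)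
  rw [pvSide_hit q r 1 (-1) 0 ring (5 * ring) ring.toNat q (Or.inl (by norm_num)) (by omega)
    (by rw [hc]; omega) (by omega) (by omega)]

lemma side6_miss (q r ring : Int) (hpos : 0 < ring)
    (hs : ¬(ring = q ∧ (0 : Int) = r))
    (hx : ¬(q + r = ring ∧ 1 ≤ q ∧ q ≤ ring - 1)) :
    pvSide q r 1 (-1) 0 ring (5 * ring) ring.toNat = Sum.inl (ring, 0, 6 * ring) := by
  have hc : (ring.toNat : Int) = ring := Int.toNat_of_nonneg (by omega)
  rw [pvSide_miss q r 1 (-1) 0 ring (5 * ring) ring.toNat (by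
    intro t ht1 ht2 he
    rw [hc] at ht2
    by_cases ht : t = ring
    · exact hs ⟨by omega, by omega⟩
    · exact hx ⟨by omega, by omega, by omega⟩), hc]
  simp only [Sum.inl.injEq, Prod.mk.injEq]
  exact ⟨by ring, by ring, by ring⟩

theorem compute_ring_index_eq (q r ring : Int) :
    compute_ring_index q r ring = compute_ring_index_alt q r ring := by
  unfold compute_ring_index compute_ring_index_alt
  by_cases h0 : ring = 0
  · subst h0; norm_num
  rw [if_neg h0]
  rcases lt_or_gt_of_ne h0 with hneg | hpos
  · -- ring < 0 : both sides are 0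
    have hn : ring.toNat = 0 := by omega
    conv_rhs => rw [if_pos (show ring ≤ 0 by omega)]
    by_cases hs : ring = q ∧ (0 : Int) = r
    · rw [if_pos hs]
    · rw [if_neg hs, hn]
      simp only [List.foldl_cons, List.foldl_nil, pvSide]
      exact (PySem.Int.mod_eq_zero_iff_dvd 0 (ring * 6)).mpr (dvd_zero _)
  · conv_rhs => rw [if_neg (show ¬ ring ≤ 0 by omega)]
    by_cases hs : ring = q ∧ (0 : Int) = r
    · rw [if_pos hs]
      obtain ⟨hq, hr⟩ := hs
      rw [if_neg (show ¬ max (max |q| |r|) |q + r| ≠ ring by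
        simp only [Int.abs_eq_natAbs]; omega), if_pos (by omega : q = ring)]
      omega
    rw [if_neg hs]
    simp only [List.foldl_cons, List.foldl_nil]
    by_cases c1 : q = ring ∧ -ring ≤ r ∧ r ≤ -1
    · simp only [side1_hit q r ring hpos c1.1 c1.2.1 c1.2.2]
      rw [if_neg (show ¬ max (max |q| |r|) |q + r| ≠ ring by
        simp only [Int.abs_eq_natAbs]; omega), if_pos c1.1]
    simp only [side1_miss q r ring hpos c1]
    by_cases c2 : r = -ring ∧ 0 ≤ q ∧ q ≤ ring - 1
    · simp only [side2_hit q r ring hpos c2.1 c2.2.1 c2.2.2]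
      rw [if_neg (show ¬ max (max |q| |r|) |q + r| ≠ ring by
        simp only [Int.abs_eq_natAbs]; omega), if_neg (show ¬ q = ring by omega),
        if_pos (Or.inl c2.1)]
    simp only [side2_miss q r ring hpos c2]
    by_cases c3 : q + r = -ring ∧ -ring ≤ q ∧ q ≤ -1
    · simp only [side3_hit q r ring hpos c3.1 c3.2.1 c3.2.2]
      rw [if_neg (show ¬ max (max |q| |r|) |q + r| ≠ ring by
        simp only [Int.abs_eq_natAbs]; omega), if_neg (show ¬ q = ring by omega),
        if_pos (Or.inr c3.1)]
    simp only [side3_miss q r ring hpos c3]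
    by_cases c4 : q = -ring ∧ 1 ≤ r ∧ r ≤ ring
    · simp only [side4_hit q r ring hpos c4.1 c4.2.1 c4.2.2]
      rw [if_neg (show ¬ max (max |q| |r|) |q + r| ≠ ring by
        simp only [Int.abs_eq_natAbs]; omega), if_neg (show ¬ q = ring by omega),
        if_neg (show ¬ (r = -ring ∨ q + r = -ring) by omega), if_pos c4.1]
    simp only [side4_miss q r ring hpos c4]
    by_cases c5 : r = ring ∧ -ring + 1 ≤ q ∧ q ≤ 0
    · simp only [side5_hit q r ring hpos c5.1 c5.2.1 c5.2.2]
      rw [if_neg (show ¬ max (max |q| |r|) |q + r| ≠ ring by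
        simp only [Int.abs_eq_natAbs]; omega), if_neg (show ¬ q = ring by omega),
        if_neg (show ¬ (r = -ring ∨ q + r = -ring) by omega),
        if_neg (show ¬ q = -ring by omega)]
    simp only [side5_miss q r ring hpos c5]
    by_cases c6 : q + r = ring ∧ 1 ≤ q ∧ q ≤ ring - 1
    · simp only [side6_hit q r ring hpos c6.1 c6.2.1 c6.2.2]
      rw [if_neg (show ¬ max (max |q| |r|) |q + r| ≠ ring by
        simp only [Int.abs_eq_natAbs]; omega), if_neg (show ¬ q = ring by omega),
        if_neg (show ¬ (r = -ring ∨ q + r = -ring) by omega),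
        if_neg (show ¬ q = -ring by omega)]
    simp only [side6_miss q r ring hpos hs c6]
    rw [if_pos (show max (max |q| |r|) |q + r| ≠ ring by
      simp only [Int.abs_eq_natAbs]; omega)]
    exact (PySem.Int.mod_eq_zero_iff_dvd (6 * ring) (ring * 6)).mpr ⟨1, by ring⟩

-- ===== VERDICT (by name: the statement is the Claim_ definition above) =====
theorem compute_ring_index_spec : Claim_equal_compute_ring_index := by
  intro q r ring _
  exact compute_ring_index_eq q r ring
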